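-- pv_equiv track=rewrite | github.com/Yo1ogreyZz/CellularAutomata | GraphRepresent_Pure.py | rule_number_to_table
-- ===== SOURCE A (Python) =====
-- from typing import Optional, List, Dict, Any, Tuple
--
-- def rule_number_to_table(rule_number: int) -> Dict[Tuple[int, ...], int]:
--     """
--     Convert a Wolfram rule number into a lookup table mapping a 3-bit
--     neighborhood (left, center, right) to the next center state.
--
--     Parameters
--     ----------
--     rule_number : int
--         ECA rule number in [0, 255].
--
--     Returns
--     -------
--     Dict[Tuple[int, ...], int]
--         Mapping from neighborhood tuple (l, c, r) to next center state (0/1).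
--     """
--     neighborhoods = [
--         (1, 1, 1),
--         (1, 1, 0),
--         (1, 0, 1),
--         (1, 0, 0),
--         (0, 1, 1),
--         (0, 1, 0),
--         (0, 0, 1),
--         (0, 0, 0),
--     ]
--     if not (0 <= rule_number <= 255):
--         raise ValueError("Wolfram ECA rule number must be in [0, 255].")
--
--     # MSB->LSB, e.g. 30 -> '00011110'
--     rule_binary = format(rule_number, '08b')
--     rule_outputs = [int(bit) for bit in rule_binary]
--
--     rule_table: Dict[Tuple[int, ...], int] = {}
--     for neighborhood, output in zip(neighborhoods, rule_outputs):
--         rule_table[neighborhood] = output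
--     return rule_table
-- ===== SOURCE B (Python) =====
-- def rule_number_to_table(rule_number: int):
--     """Build the ECA rule table by divide-and-conquer: recursively split the
--     rule number into its high and low bit-halves, the high half giving the
--     entries whose pattern begins with a set bit, the low half the rest."""
--     if not (0 <= rule_number <= 255):
--         raise ValueError("Wolfram ECA rule number must be in [0, 255].")
--
--     def split(prefix, width, bits):
--         if width == 0:
--             return {prefix: bits}
--         shift = 1 << (width - 1)
--         table = split(prefix + (1,), width - 1, bits >> shift)
--         table.update(split(prefix + (0,), width - 1, bits & ((1 << shift) - 1)))
--         return table
--
--     return split((), 3, rule_number)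
-- ===== Notes on version B (the rewrite author's own statement) =====
-- stated objective: alternative
-- what changed: Replaced the hardcoded neighborhood list, binary-string formatting and zip with a recursive divide-and-conquer that splits the rule number into its high and low bit-halves, the high half producing the entries whose pattern begins with a set bit and the low half the rest.
import Mathlib
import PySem

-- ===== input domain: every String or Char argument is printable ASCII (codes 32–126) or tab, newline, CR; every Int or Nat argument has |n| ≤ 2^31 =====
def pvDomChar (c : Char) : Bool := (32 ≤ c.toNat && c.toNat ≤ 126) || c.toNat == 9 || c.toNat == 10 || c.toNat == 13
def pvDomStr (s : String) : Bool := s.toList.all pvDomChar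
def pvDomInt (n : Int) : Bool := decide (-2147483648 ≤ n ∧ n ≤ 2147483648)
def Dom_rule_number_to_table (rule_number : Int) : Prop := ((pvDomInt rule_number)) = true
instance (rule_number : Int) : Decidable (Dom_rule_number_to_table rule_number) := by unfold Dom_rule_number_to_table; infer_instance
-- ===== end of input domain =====

-- B replaces A's hardcoded neighborhood list and binary-string formatting with a
-- recursive high/low bit-half split of the rule number (alternative, same cost).


-- ===== PORT A =====
def rule_number_to_table (rule_number : Int) : List (List Int × Int) :=
  let neighborhoods : List (List Int) :=
    [[1,1,1],[1,1,0],[1,0,1],[1,0,0],[0,1,1],[0,1,0],[0,0,1],[0,0,0]]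
  -- format(rule_number, '08b'): binary digits left-padded with '0' to width 8
  -- (exact for 0 ≤ rule_number ≤ 255, which Pre_ guarantees)
  let s := PySem.Int.toBinChars rule_number
  let ruleBinary := List.replicate (8 - s.length) '0' ++ s
  -- int(bit) on a single digit char
  let ruleOutputs := ruleBinary.map (fun c => (PySem.Int.ofChars? [c]).getD 0)
  ((neighborhoods.zip ruleOutputs).foldl
    (fun d p => d.insert p.1 p.2) PySem.Dict.empty).items

-- ===== PORT B =====
-- recursive helper 'split' of Source B; d.update(d2) is a fold of insert over d2's items
def ruleSplit (pref : List Int) (width : Nat) (bits : Int) :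
    PySem.Dict (List Int) Int :=
  match width with
  | 0 => PySem.Dict.empty.insert pref bits
  | w + 1 =>
    let shift : Nat := 1 <<< w
    let table := ruleSplit (pref ++ [1]) w (bits >>> shift)
    ((ruleSplit (pref ++ [0]) w (PySem.Int.band bits (((1 <<< shift : Nat) : Int) - 1))).items).foldl
      (fun d p => d.insert p.1 p.2) table

def rule_number_to_table_alt (rule_number : Int) : List (List Int × Int) :=
  (ruleSplit [] 3 rule_number).items

-- ===== PRECONDITION & SPEC =====
-- A raises ValueError outside [0, 255]; exactly those inputs are excluded.
def Pre_rule_number_to_table (rule_number : Int) : Prop :=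
  0 ≤ rule_number ∧ rule_number ≤ 255
instance (rule_number : Int) : Decidable (Pre_rule_number_to_table rule_number) := by
  unfold Pre_rule_number_to_table; infer_instance

def pvWitness_rule_number_to_table : Int := 30

def Spec_rule_number_to_table (rule_number : Int) (out : List (List Int × Int)) : Prop := out = rule_number_to_table_alt rule_number
instance (rule_number : Int) (out : List (List Int × Int)) : Decidable (Spec_rule_number_to_table rule_number out) := by unfold Spec_rule_number_to_table; infer_instance

-- ===== CLAIM (what is proved, stated in full; the proofs are below) =====
def Claim_equal_rule_number_to_table : Prop := ∀ (rule_number : Int), Dom_rule_number_to_table rule_number → Pre_rule_number_to_table rule_number → Spec_rule_number_to_table rule_number (rule_number_to_table rule_number)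

-- ===== LEMMAS AND PROOFS =====

-- ===== VERDICT (by name: the statement is the Claim_ definition above) =====
theorem rule_number_to_table_spec : Claim_equal_rule_number_to_table := by
  intro n _ hpre
  obtain ⟨h0, h1⟩ := hpre
  unfold Spec_rule_number_to_table
  interval_cases n <;> decide
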